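-- pv_equiv track=rewrite | github.com/lsj1137/problem-solving | SWEA/D4/2819. 격자판의 숫자 이어 붙이기/격자판의 숫자 이어 붙이기.py | dfs
-- ===== SOURCE A (Python) =====
-- dx = [-1, 0, 1, 0]
--
-- dy = [0, 1, 0, -1]
--
-- def dfs(x, y, board, depth, cur):
--     result = set([])
--     if depth == 7:
--         return set([cur])
--     cur += board[x][y]
--     for i in range(4):
--         nx = x + dx[i]
--         ny = y + dy[i]
--         if nx>-1 and nx<4 and ny>-1 and ny<4:
--             result = result.union(dfs(nx, ny, board, depth+1, cur))
--     return result
-- ===== SOURCE B (Python) =====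
-- dx = [-1, 0, 1, 0]
--
-- dy = [0, 1, 0, -1]
--
-- def dfs(x, y, board, depth, cur):
--     leaves = []
--     stack = [(x, y, depth, cur)]
--     while stack:
--         cx, cy, d, s = stack.pop()
--         if d == 7:
--             leaves.append(s)
--             continue
--         s += board[cx][cy]
--         for i in (3, 2, 1, 0):
--             nx = cx + dx[i]
--             ny = cy + dy[i]
--             if nx > -1 and nx < 4 and ny > -1 and ny < 4:
--                 stack.append((nx, ny, d + 1, s))
--     return set(leaves)
-- ===== Notes on version B (the rewrite author's own statement) =====
-- stated objective: alternative
-- what changed: A's recursion, which builds a set at every node and merges child sets with set.union at each of the four branches, is replaced by an explicit-stack worklist iteration that streams the finished walk strings into one flat list and deduplicates once with a single set() at the end.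
import Mathlib
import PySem

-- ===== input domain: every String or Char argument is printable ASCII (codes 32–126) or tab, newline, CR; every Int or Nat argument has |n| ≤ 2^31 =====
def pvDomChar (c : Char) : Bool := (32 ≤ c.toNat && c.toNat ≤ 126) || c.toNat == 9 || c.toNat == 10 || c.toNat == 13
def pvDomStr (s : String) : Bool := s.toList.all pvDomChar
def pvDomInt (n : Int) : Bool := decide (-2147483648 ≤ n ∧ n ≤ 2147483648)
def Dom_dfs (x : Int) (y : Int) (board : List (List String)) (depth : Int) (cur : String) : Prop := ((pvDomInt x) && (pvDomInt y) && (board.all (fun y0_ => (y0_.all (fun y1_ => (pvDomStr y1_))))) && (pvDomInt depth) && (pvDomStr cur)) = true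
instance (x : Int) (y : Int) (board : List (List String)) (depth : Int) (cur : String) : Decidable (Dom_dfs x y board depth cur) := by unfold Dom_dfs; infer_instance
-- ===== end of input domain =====

-- B replaces A's recursion with per-level set unions by an explicit-stack iteration that
-- streams the finished walk strings into one list and deduplicates once at the end
-- (objective: alternative decomposition, same asymptotic cost).

-- ===== PORT A =====
-- module-level constants dx, dy
def dxL : List Int := [-1, 0, 1, 0]
def dyL : List Int := [0, 1, 0, -1]

-- Literal port of A's recursion; `fuel` only makes the recursion structural: on every
-- input on which the Python terminates the `0` branch is never reached (fuel starts at
-- (7-depth).toNat+1 and each level consumes exactly one unit).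
-- dx[i]/dy[i] for i = 0..3 are always in range, so pyGetD _ i 0 = dx[i] exactly.
def dfsAux (board : List (List String)) (fuel : Nat) (x : Int) (y : Int) (depth : Int) (cur : String) : PySem.Set String :=
  if depth = 7 then PySem.Set.ofList [cur]
  else
    match fuel with
    | 0 => PySem.Set.empty  -- unreachable when the Python returns (it would recurse forever here)
    | f + 1 =>
      match PySem.List.pyGet? board x with
      | none => PySem.Set.empty  -- IndexError in Python: outside Pre_
      | some row =>
        match PySem.List.pyGet? row y with
        | none => PySem.Set.empty  -- IndexError in Python: outside Pre_
        | some c =>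
          (PySem.List.pyRange 0 4 1).foldl
            (fun result i =>
              if x + PySem.List.pyGetD dxL i 0 > -1 ∧ x + PySem.List.pyGetD dxL i 0 < 4 ∧
                 y + PySem.List.pyGetD dyL i 0 > -1 ∧ y + PySem.List.pyGetD dyL i 0 < 4 then
                PySem.Set.union result
                  (dfsAux board f (x + PySem.List.pyGetD dxL i 0) (y + PySem.List.pyGetD dyL i 0) (depth + 1) (cur ++ c))
              else result)
            (PySem.Set.ofList [])
termination_by fuel

def dfs (x : Int) (y : Int) (board : List (List String)) (depth : Int) (cur : String) : List String :=
  dfsAux board ((7 - depth).toNat + 1) x y depth cur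

-- ===== PORT B =====
-- Upper bound on the number of stack pops B's loop performs when it terminates:
-- Mv k = 1 + 4 + … + 4^k bounds the node count of a branching-4 tree of height k.
-- (Used only as the loop fuel of the port; the proofs show the 0 branch is unreachable.)
def Mv : Nat → Nat
  | 0 => 1
  | k + 1 => 1 + 4 * Mv k

-- Literal port of B's while-loop (stack top = list head; Python pushes i = 3,2,1,0 so the
-- i = 0 child ends on top).  `fuel` bounds the number of pops; Mv ((7-depth).toNat+1)
-- exceeds the pop count whenever the Python loop terminates, so the 0 branch is never
-- reached on such inputs.
def dfsRun (board : List (List String)) (fuel : Nat) (stack : List (Int × Int × Int × String)) (leaves : List String) : List String :=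
  match stack with
  | [] => PySem.Set.ofList leaves
  | (cx, cy, d, s) :: rest =>
    match fuel with
    | 0 => PySem.Set.ofList leaves  -- unreachable when the Python terminates
    | f + 1 =>
      if d = 7 then dfsRun board f rest (leaves ++ [s])
      else
        match PySem.List.pyGet? board cx with
        | none => dfsRun board f rest leaves  -- IndexError in Python: outside Pre_ (sentinel: skip)
        | some row =>
          match PySem.List.pyGet? row cy with
          | none => dfsRun board f rest leaves  -- IndexError in Python: outside Pre_ (sentinel: skip)
          | some c =>
            dfsRun board f
              (([3, 2, 1, 0] : List Int).foldl
                (fun st i =>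
                  if cx + PySem.List.pyGetD dxL i 0 > -1 ∧ cx + PySem.List.pyGetD dxL i 0 < 4 ∧
                     cy + PySem.List.pyGetD dyL i 0 > -1 ∧ cy + PySem.List.pyGetD dyL i 0 < 4 then
                    (cx + PySem.List.pyGetD dxL i 0, cy + PySem.List.pyGetD dyL i 0, d + 1, s ++ c) :: st
                  else st)
                rest)
              leaves
termination_by fuel

def dfs_alt (x : Int) (y : Int) (board : List (List String)) (depth : Int) (cur : String) : List String :=
  dfsRun board (Mv ((7 - depth).toNat + 1)) [(x, y, depth, cur)] []

-- ===== PRECONDITION & SPEC =====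
-- board[x][y] succeeds under Python indexing (negative x/y wrap)
def idxOK (board : List (List String)) (x : Int) (y : Int) : Bool :=
  match PySem.List.pyGet? board x with
  | none => false
  | some row => (PySem.List.pyGet? row y).isSome

-- Pre_ restricts the claim to the function's natural domain — depth is the contest's
-- recursion counter (0..7) and board carries the contest's full 4x4 grid: it admits
-- depth = 7 (immediate return); depth = 6 with an indexable start cell (the children
-- return without indexing, so any board works); 0 ≤ depth < 7 with the full 4x4 grid and
-- an indexable start; and any start whose cell is indexable but has no in-grid neighbour
-- (A returns the empty set there, for every depth ≠ 7).  Outside that natural domain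
-- Python mostly raises or diverges (IndexError on an unindexable cell of the walk,
-- RecursionError/divergence for depth > 7 with an in-grid neighbour and for very negative
-- depths); the remaining malformed inputs — negative depths, where the walk is no longer
-- the problem's 7 cells, and sub-4x4 boards on which a short walk happens to stay
-- indexable — are excluded as outside the task's domain, not because the programs differ:
-- on the excluded inputs where A still returns, B returns the same value (see cites).
def Pre_dfs (x : Int) (y : Int) (board : List (List String)) (depth : Int) (cur : String) : Prop :=
  depth = 7 ∨
  (depth = 6 ∧ idxOK board x y = true) ∨
  (0 ≤ depth ∧ depth < 7 ∧ idxOK board x y = true ∧ 4 ≤ board.length ∧ ∀ r ∈ board.take 4, 4 ≤ r.length) ∨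
  (depth ≠ 7 ∧ idxOK board x y = true ∧
    ¬(x - 1 > -1 ∧ x - 1 < 4 ∧ y > -1 ∧ y < 4) ∧
    ¬(x + 1 > -1 ∧ x + 1 < 4 ∧ y > -1 ∧ y < 4) ∧
    ¬(x > -1 ∧ x < 4 ∧ y + 1 > -1 ∧ y + 1 < 4) ∧
    ¬(x > -1 ∧ x < 4 ∧ y - 1 > -1 ∧ y - 1 < 4))
instance (x : Int) (y : Int) (board : List (List String)) (depth : Int) (cur : String) : Decidable (Pre_dfs x y board depth cur) := by unfold Pre_dfs; infer_instance

def pvWitness_dfs : Int × Int × List (List String) × Int × String :=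
  (0, 0, [["1","2","3","4"],["5","6","7","8"],["9","0","1","2"],["3","4","5","6"]], 6, "")

def Spec_dfs (x : Int) (y : Int) (board : List (List String)) (depth : Int) (cur : String) (out : List String) : Prop := out = dfs_alt x y board depth cur
instance (x : Int) (y : Int) (board : List (List String)) (depth : Int) (cur : String) (out : List String) : Decidable (Spec_dfs x y board depth cur out) := by unfold Spec_dfs; infer_instance

-- ===== CLAIM (what is proved, stated in full; the proofs are below) =====
def Claim_equal_dfs : Prop := ∀ (x : Int) (y : Int) (board : List (List String)) (depth : Int) (cur : String), Dom_dfs x y board depth cur → Pre_dfs x y board depth cur → Spec_dfs x y board depth cur (dfs x y board depth cur)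

-- ===== LEMMAS AND PROOFS =====

-- The raw stream of length-7 walk strings, in A's (= B's) depth-first order, as a plain
-- list; both ports are proved equal to its deduplication.
def Lv (board : List (List String)) (fuel : Nat) (x : Int) (y : Int) (d : Int) (cur : String) : List String :=
  if d = 7 then [cur]
  else
    match fuel with
    | 0 => []
    | f + 1 =>
      match PySem.List.pyGet? board x with
      | none => []
      | some row =>
        match PySem.List.pyGet? row y with
        | none => []
        | some c =>
          (([0, 1, 2, 3] : List Int).flatMap (fun i =>
            if x + PySem.List.pyGetD dxL i 0 > -1 ∧ x + PySem.List.pyGetD dxL i 0 < 4 ∧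
               y + PySem.List.pyGetD dyL i 0 > -1 ∧ y + PySem.List.pyGetD dyL i 0 < 4 then
              [(x + PySem.List.pyGetD dxL i 0, y + PySem.List.pyGetD dyL i 0, d + 1, cur ++ c)]
            else [])).flatMap (fun t => Lv board f t.1 t.2.1 t.2.2.1 t.2.2.2)
termination_by fuel

-- number of stack pops the subtree costs B (= number of calls A makes)
def Nv (board : List (List String)) (fuel : Nat) (x : Int) (y : Int) (d : Int) (cur : String) : Nat :=
  if d = 7 then 1
  else
    match fuel with
    | 0 => 1
    | f + 1 =>
      match PySem.List.pyGet? board x with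
      | none => 1
      | some row =>
        match PySem.List.pyGet? row y with
        | none => 1
        | some c =>
          1 + ((([0, 1, 2, 3] : List Int).flatMap (fun i =>
            if x + PySem.List.pyGetD dxL i 0 > -1 ∧ x + PySem.List.pyGetD dxL i 0 < 4 ∧
               y + PySem.List.pyGetD dyL i 0 > -1 ∧ y + PySem.List.pyGetD dyL i 0 < 4 then
              [(x + PySem.List.pyGetD dxL i 0, y + PySem.List.pyGetD dyL i 0, d + 1, cur ++ c)]
            else [])).map (fun t => Nv board f t.1 t.2.1 t.2.2.1 t.2.2.2)).sum
termination_by fuel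

theorem update_ofList_right {α : Type} [BEq α] [LawfulBEq α] (s : PySem.Set α) (xs : List α) :
    PySem.Set.update s (PySem.Set.ofList xs) = PySem.Set.update s xs := by
  induction xs using List.reverseRecOn with
  | nil => rfl
  | append_singleton xs x ih =>
    rw [PySem.Set.ofList_append_singleton, PySem.Set.update_append,
        PySem.Set.update_cons, PySem.Set.update_nil]
    by_cases hx : x ∈ PySem.Set.ofList xs
    · have hx' : x ∈ PySem.Set.update s xs := by
        rw [PySem.Set.mem_update]; right; rwa [PySem.Set.mem_ofList] at hx
      rw [PySem.Set.add_of_mem hx, ih, PySem.Set.add_of_mem hx']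
    · rw [PySem.Set.add_of_not_mem hx, PySem.Set.update_append, ih,
          PySem.Set.update_cons, PySem.Set.update_nil]

theorem union_ofList_ofList {α : Type} [BEq α] [LawfulBEq α] (a b : List α) :
    PySem.Set.union (PySem.Set.ofList a) (PySem.Set.ofList b) = PySem.Set.ofList (a ++ b) := by
  show PySem.Set.update (PySem.Set.ofList a) (PySem.Set.ofList b) = _
  rw [update_ofList_right, PySem.Set.ofList_append]

theorem foldl_union {C : Int → Prop} [DecidablePred C] (g : Int → PySem.Set String) (gl : Int → List String)
    (hg : ∀ i, C i → g i = PySem.Set.ofList (gl i)) :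
    ∀ (l : List Int) (acc : List String),
      l.foldl (fun r i => if C i then PySem.Set.union r (g i) else r) (PySem.Set.ofList acc)
        = PySem.Set.ofList (acc ++ l.flatMap (fun i => if C i then gl i else [])) := by
  intro l
  induction l with
  | nil => intro acc; simp
  | cons i l ih =>
    intro acc
    by_cases h : C i
    · simp only [List.foldl_cons, if_pos h, List.flatMap_cons]
      rw [hg i h, union_ofList_ofList, ih (acc ++ gl i)]
      simp [List.append_assoc]
    · simp only [List.foldl_cons, if_neg h, List.flatMap_cons]
      rw [ih acc]; simp

theorem flatMap_if_singleton {α β : Type} (l : List Int) (C : Int → Prop) [DecidablePred C]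
    (e : Int → α) (g : α → List β) :
    (l.flatMap (fun i => if C i then [e i] else [])).flatMap g
      = l.flatMap (fun i => if C i then g (e i) else []) := by
  induction l with
  | nil => simp
  | cons i l ih =>
    simp only [List.flatMap_cons, List.flatMap_append, ih]
    by_cases h : C i <;> simp [h]

theorem foldl_push_eq {α : Type} (C : Int → Prop) [DecidablePred C] (e : Int → α) (rest : List α) :
    ([3, 2, 1, 0] : List Int).foldl (fun st i => if C i then e i :: st else st) rest
      = ([0, 1, 2, 3] : List Int).flatMap (fun i => if C i then [e i] else []) ++ rest := by
  simp only [List.foldl_cons, List.foldl_nil, List.flatMap_cons, List.flatMap_nil]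
  split_ifs <;> simp

theorem dfsAux_eq_ofList_Lv (board : List (List String)) :
    ∀ (fuel : Nat) (x y d : Int) (cur : String),
      dfsAux board fuel x y d cur = PySem.Set.ofList (Lv board fuel x y d cur) := by
  intro fuel
  induction fuel with
  | zero =>
    intro x y d cur
    rw [dfsAux, Lv]
    by_cases h : d = 7 <;> simp [h, PySem.Set.empty]
  | succ f ih =>
    intro x y d cur
    rw [dfsAux, Lv]
    by_cases h : d = 7
    · simp [h]
    · rw [if_neg h, if_neg h]
      cases hb : PySem.List.pyGet? board x with
      | none => simp [hb, PySem.Set.empty]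
      | some row =>
        simp only [hb]
        cases hr : PySem.List.pyGet? row y with
        | none => simp [hr, PySem.Set.empty]
        | some c =>
          simp only [hr]
          have hrange : PySem.List.pyRange 0 4 1 = ([0, 1, 2, 3] : List Int) := by decide
          rw [hrange, flatMap_if_singleton]
          rw [foldl_union
            (C := fun i => x + PySem.List.pyGetD dxL i 0 > -1 ∧ x + PySem.List.pyGetD dxL i 0 < 4 ∧
                 y + PySem.List.pyGetD dyL i 0 > -1 ∧ y + PySem.List.pyGetD dyL i 0 < 4)
            (g := fun i => dfsAux board f (x + PySem.List.pyGetD dxL i 0) (y + PySem.List.pyGetD dyL i 0) (d + 1) (cur ++ c))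
            (gl := fun i => Lv board f (x + PySem.List.pyGetD dxL i 0) (y + PySem.List.pyGetD dyL i 0) (d + 1) (cur ++ c))
            (fun i _ => ih (x + PySem.List.pyGetD dxL i 0) (y + PySem.List.pyGetD dyL i 0) (d + 1) (cur ++ c))
            ([0, 1, 2, 3] : List Int) []]
          simp

theorem one_le_Nv (board : List (List String)) (fuel : Nat) (x y d : Int) (cur : String) :
    1 ≤ Nv board fuel x y d cur := by
  rw [Nv.eq_def]
  repeat' split
  all_goals omega

theorem Nv_le_Mv (board : List (List String)) :
    ∀ (fuel : Nat) (x y d : Int) (cur : String), Nv board fuel x y d cur ≤ Mv fuel := by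
  intro fuel
  induction fuel with
  | zero =>
    intro x y d cur
    rw [Nv, Mv]
    split <;> omega
  | succ f ih =>
    intro x y d cur
    rw [Nv, Mv]
    have hM : 0 < Mv f := by cases f <;> (rw [Mv]; omega)
    by_cases h : d = 7
    · rw [if_pos h]; omega
    · rw [if_neg h]
      cases hb : PySem.List.pyGet? board x with
      | none => simp [hb]
      | some row =>
        simp only [hb]
        cases hr : PySem.List.pyGet? row y with
        | none => simp [hr]
        | some c =>
          simp only [hr]
          have hlen :
              (([0, 1, 2, 3] : List Int).flatMap (fun i =>
                if x + PySem.List.pyGetD dxL i 0 > -1 ∧ x + PySem.List.pyGetD dxL i 0 < 4 ∧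
                   y + PySem.List.pyGetD dyL i 0 > -1 ∧ y + PySem.List.pyGetD dyL i 0 < 4 then
                  [(x + PySem.List.pyGetD dxL i 0, y + PySem.List.pyGetD dyL i 0, d + 1, cur ++ c)]
                else [])).length ≤ 4 := by
            simp only [List.flatMap_cons, List.flatMap_nil, List.length_append]
            split_ifs <;> simp
          have hsum :
              ((([0, 1, 2, 3] : List Int).flatMap (fun i =>
                if x + PySem.List.pyGetD dxL i 0 > -1 ∧ x + PySem.List.pyGetD dxL i 0 < 4 ∧
                   y + PySem.List.pyGetD dyL i 0 > -1 ∧ y + PySem.List.pyGetD dyL i 0 < 4 then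
                  [(x + PySem.List.pyGetD dxL i 0, y + PySem.List.pyGetD dyL i 0, d + 1, cur ++ c)]
                else [])).map (fun t => Nv board f t.1 t.2.1 t.2.2.1 t.2.2.2)).sum ≤ 4 * Mv f := by
            refine le_trans (List.sum_le_card_nsmul _ (Mv f) ?_) ?_
            · intro n hn
              rcases List.mem_map.mp hn with ⟨t, _, rfl⟩
              exact ih t.1 t.2.1 t.2.2.1 t.2.2.2
            · simp only [List.length_map, smul_eq_mul]
              exact Nat.mul_le_mul_right _ hlen
          omega

theorem runB_spine (board : List (List String)) :
    ∀ (af : Nat) (x y d : Int) (cur : String) (rest : List (Int × Int × Int × String)) (ls : List String) (F : Nat),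
      d ≤ 7 → af = (7 - d).toNat + 1 → Nv board af x y d cur ≤ F →
      dfsRun board F ((x, y, d, cur) :: rest) ls
        = dfsRun board (F - Nv board af x y d cur) rest (ls ++ Lv board af x y d cur) := by
  intro af
  induction af with
  | zero => intro x y d cur rest ls F h7 haf hN; omega
  | succ k ih =>
    intro x y d cur rest ls F h7 haf hN
    have h1N : 1 ≤ Nv board (k + 1) x y d cur := one_le_Nv board _ x y d cur
    obtain ⟨F', rfl⟩ : ∃ F', F = F' + 1 := ⟨F - 1, by omega⟩
    rw [dfsRun]
    by_cases hd : d = 7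
    · have hNv : Nv board (k + 1) x y d cur = 1 := by rw [Nv]; rw [if_pos hd]
      have hLv : Lv board (k + 1) x y d cur = [cur] := by rw [Lv]; rw [if_pos hd]
      rw [if_pos hd, hNv, hLv]
      simp
    · rw [if_neg hd]
      have hd7 : d < 7 := lt_of_le_of_ne h7 hd
      have hk : k = (7 - (d + 1)).toNat + 1 := by omega
      cases hb : PySem.List.pyGet? board x with
      | none =>
        have hNv : Nv board (k + 1) x y d cur = 1 := by rw [Nv]; rw [if_neg hd]; simp [hb]
        have hLv : Lv board (k + 1) x y d cur = [] := by rw [Lv]; rw [if_neg hd]; simp [hb]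
        rw [hNv, hLv]
        simp
      | some row =>
        simp only [hb]
        cases hr : PySem.List.pyGet? row y with
        | none =>
          have hNv : Nv board (k + 1) x y d cur = 1 := by
            rw [Nv]; rw [if_neg hd]; simp [hb, hr]
          have hLv : Lv board (k + 1) x y d cur = [] := by
            rw [Lv]; rw [if_neg hd]; simp [hb, hr]
          rw [hNv, hLv]
          simp
        | some c =>
          simp only [hr]
          rw [foldl_push_eq
            (C := fun i => x + PySem.List.pyGetD dxL i 0 > -1 ∧ x + PySem.List.pyGetD dxL i 0 < 4 ∧
                 y + PySem.List.pyGetD dyL i 0 > -1 ∧ y + PySem.List.pyGetD dyL i 0 < 4)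
            (e := fun i => (x + PySem.List.pyGetD dxL i 0, y + PySem.List.pyGetD dyL i 0, d + 1, cur ++ c))
            rest]
          have aux : ∀ (cs : List (Int × Int × Int × String)), (∀ t ∈ cs, t.2.2.1 = d + 1) →
              ∀ (rest : List (Int × Int × Int × String)) (ls : List String) (F : Nat),
              (cs.map (fun t => Nv board k t.1 t.2.1 t.2.2.1 t.2.2.2)).sum ≤ F →
              dfsRun board F (cs ++ rest) ls
                = dfsRun board (F - (cs.map (fun t => Nv board k t.1 t.2.1 t.2.2.1 t.2.2.2)).sum) rest
                    (ls ++ cs.flatMap (fun t => Lv board k t.1 t.2.1 t.2.2.1 t.2.2.2)) := by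
            intro cs
            induction cs with
            | nil => intro _ rest ls F _; simp
            | cons t cs ihc =>
              intro hmem rest ls F hsum
              obtain ⟨tx, ty, td, ts⟩ := t
              have htd : td = d + 1 := hmem _ (List.mem_cons_self)
              subst htd
              simp only [List.map_cons, List.sum_cons] at hsum ⊢
              simp only [List.cons_append, List.flatMap_cons]
              rw [ih tx ty (d + 1) ts (cs ++ rest) ls F (by omega) hk (by omega)]
              rw [ihc (fun t ht => hmem t (List.mem_cons_of_mem _ ht)) rest
                    (ls ++ Lv board k tx ty (d + 1) ts)
                    (F - Nv board k tx ty (d + 1) ts) (by omega)]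
              have harith : F - Nv board k tx ty (d + 1) ts -
                    (cs.map (fun t => Nv board k t.1 t.2.1 t.2.2.1 t.2.2.2)).sum
                  = F - (Nv board k tx ty (d + 1) ts +
                    (cs.map (fun t => Nv board k t.1 t.2.1 t.2.2.1 t.2.2.2)).sum) := by omega
              rw [harith, List.append_assoc]
          have hmemE : ∀ t ∈ (([0, 1, 2, 3] : List Int).flatMap (fun i =>
              if x + PySem.List.pyGetD dxL i 0 > -1 ∧ x + PySem.List.pyGetD dxL i 0 < 4 ∧
                 y + PySem.List.pyGetD dyL i 0 > -1 ∧ y + PySem.List.pyGetD dyL i 0 < 4 then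
                [(x + PySem.List.pyGetD dxL i 0, y + PySem.List.pyGetD dyL i 0, d + 1, cur ++ c)]
              else [])), t.2.2.1 = d + 1 := by
            intro t ht
            rcases List.mem_flatMap.mp ht with ⟨i, -, hti⟩
            split at hti
            · rw [List.mem_singleton.mp hti]
            · simp at hti
          have hNv : Nv board (k + 1) x y d cur
              = 1 + ((([0, 1, 2, 3] : List Int).flatMap (fun i =>
                if x + PySem.List.pyGetD dxL i 0 > -1 ∧ x + PySem.List.pyGetD dxL i 0 < 4 ∧
                   y + PySem.List.pyGetD dyL i 0 > -1 ∧ y + PySem.List.pyGetD dyL i 0 < 4 then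
                  [(x + PySem.List.pyGetD dxL i 0, y + PySem.List.pyGetD dyL i 0, d + 1, cur ++ c)]
                else [])).map (fun t => Nv board k t.1 t.2.1 t.2.2.1 t.2.2.2)).sum := by
            rw [Nv]; rw [if_neg hd]; simp [hb, hr]
          have hLv : Lv board (k + 1) x y d cur
              = (([0, 1, 2, 3] : List Int).flatMap (fun i =>
                if x + PySem.List.pyGetD dxL i 0 > -1 ∧ x + PySem.List.pyGetD dxL i 0 < 4 ∧
                   y + PySem.List.pyGetD dyL i 0 > -1 ∧ y + PySem.List.pyGetD dyL i 0 < 4 then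
                  [(x + PySem.List.pyGetD dxL i 0, y + PySem.List.pyGetD dyL i 0, d + 1, cur ++ c)]
                else [])).flatMap (fun t => Lv board k t.1 t.2.1 t.2.2.1 t.2.2.2) := by
            rw [Lv]; rw [if_neg hd]; simp [hb, hr]
          rw [hNv] at hN ⊢
          rw [hLv]
          rw [aux _ hmemE rest ls F' (by omega)]
          congr 1
          omega

theorem dfsRun_nil (board : List (List String)) (F : Nat) (ls : List String) :
    dfsRun board F [] ls = PySem.Set.ofList ls := by
  rw [dfsRun]

theorem one_le_Mv (k : Nat) : 1 ≤ Mv k := by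
  cases k <;> (rw [Mv]; try rw [Mv]) <;> omega

-- ===== VERDICT (by name: the statement is the Claim_ definition above) =====
theorem dfs_spec : Claim_equal_dfs := by
  unfold Claim_equal_dfs
  intro x y board depth cur hDom hPre
  unfold Spec_dfs dfs dfs_alt
  by_cases hd : depth ≤ 7
  · have hb : Nv board ((7 - depth).toNat + 1) x y depth cur ≤ Mv ((7 - depth).toNat + 1) :=
      Nv_le_Mv board ((7 - depth).toNat + 1) x y depth cur
    rw [runB_spine board ((7 - depth).toNat + 1) x y depth cur [] [] (Mv ((7 - depth).toNat + 1)) hd rfl hb]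
    rw [dfsAux_eq_ofList_Lv]
    rw [dfsRun_nil]
    simp
  · have h3 : depth ≠ 7 ∧ idxOK board x y = true ∧
        ¬(x - 1 > -1 ∧ x - 1 < 4 ∧ y > -1 ∧ y < 4) ∧
        ¬(x + 1 > -1 ∧ x + 1 < 4 ∧ y > -1 ∧ y < 4) ∧
        ¬(x > -1 ∧ x < 4 ∧ y + 1 > -1 ∧ y + 1 < 4) ∧
        ¬(x > -1 ∧ x < 4 ∧ y - 1 > -1 ∧ y - 1 < 4) := by
      rcases hPre with h7 | h6 | h2 | h3
      · omega
      · exact absurd (by omega : depth ≤ 7) hd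
      · exact absurd (by omega : depth ≤ 7) hd
      · exact h3
    obtain ⟨hne, hidx, hn1, hn2, hn3, hn4⟩ := h3
    unfold idxOK at hidx
    cases hbd : PySem.List.pyGet? board x with
    | none => rw [hbd] at hidx; exact absurd hidx (by simp)
    | some row =>
      rw [hbd] at hidx
      dsimp only at hidx
      cases hrw : PySem.List.pyGet? row y with
      | none => rw [hrw] at hidx; simp at hidx
      | some c =>
        have e0x : PySem.List.pyGetD dxL (0 : Int) 0 = -1 := by decide
        have e1x : PySem.List.pyGetD dxL (1 : Int) 0 = 0 := by decide
        have e2x : PySem.List.pyGetD dxL (2 : Int) 0 = 1 := by decide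
        have e3x : PySem.List.pyGetD dxL (3 : Int) 0 = 0 := by decide
        have e0y : PySem.List.pyGetD dyL (0 : Int) 0 = 0 := by decide
        have e1y : PySem.List.pyGetD dyL (1 : Int) 0 = 1 := by decide
        have e2y : PySem.List.pyGetD dyL (2 : Int) 0 = 0 := by decide
        have e3y : PySem.List.pyGetD dyL (3 : Int) 0 = -1 := by decide
        have hrange : PySem.List.pyRange 0 4 1 = ([0, 1, 2, 3] : List Int) := by decide
        have hA : dfsAux board ((7 - depth).toNat + 1) x y depth cur = PySem.Set.ofList [] := by
          rw [dfsAux]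
          rw [if_neg hne]
          simp only [hbd, hrw, hrange, List.foldl_cons, List.foldl_nil,
            e0x, e1x, e2x, e3x, e0y, e1y, e2y, e3y]
          rw [if_neg (by omega), if_neg (by omega), if_neg (by omega), if_neg (by omega)]
        have hB : ∀ F : Nat, dfsRun board (F + 1) [(x, y, depth, cur)] [] = PySem.Set.ofList [] := by
          intro F
          rw [dfsRun]
          rw [if_neg hne]
          simp only [hbd, hrw, List.foldl_cons, List.foldl_nil,
            e0x, e1x, e2x, e3x, e0y, e1y, e2y, e3y]
          rw [if_neg (by omega), if_neg (by omega), if_neg (by omega), if_neg (by omega)]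
          rw [dfsRun_nil]
        obtain ⟨F', hF'⟩ : ∃ F', Mv ((7 - depth).toNat + 1) = F' + 1 :=
          ⟨Mv ((7 - depth).toNat + 1) - 1, by have := one_le_Mv ((7 - depth).toNat + 1); omega⟩
        rw [hA, hF', hB F']
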